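-- pv_equiv track=rewrite | github.com/jdasam/qbh_project | melody_utils.py | elongate_note
-- ===== SOURCE A (Python) =====
-- def elongate_note(q_contour, patience=10):
--     output = []
--     prev_pitch = 0
--     non_pitch_count = 0
--     for pitch in q_contour:
--         if pitch > 0:
--             output.append(pitch)
--             prev_pitch = pitch
--             non_pitch_count = 0
--         else:
--             non_pitch_count += 1
--             if non_pitch_count > patience:
--                 prev_pitch = 0
--                 non_pitch_count = 0
--             output.append(prev_pitch)
--     return output
-- ===== SOURCE B (Python) =====
-- def elongate_note(q_contour, patience=10):
--     # Run-based: scan maximal runs of positive / non-positive pitches and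
--     # fill each non-positive run in closed form.
--     output = []
--     prev = 0
--     i = 0
--     n = len(q_contour)
--     while i < n:
--         if q_contour[i] > 0:
--             j = i
--             while j < n and q_contour[j] > 0:
--                 output.append(q_contour[j])
--                 j += 1
--             prev = q_contour[j - 1]
--         else:
--             j = i
--             while j < n and q_contour[j] <= 0:
--                 j += 1
--             L = j - i
--             k = min(L, max(patience, 0))
--             output.extend([prev] * k)
--             output.extend([0] * (L - k))
--             if k < L:
--                 prev = 0
--         i = j
--     return output
-- ===== Notes on version B (the rewrite author's own statement) =====
-- stated objective: alternative
-- what changed: Replaces A's element-by-element loop with a counter and carried state by a run-based scan: maximal positive runs are copied verbatim (prev := last element), and each maximal non-positive run of length L is filled in closed form with min(L, max(patience,0)) copies of prev followed by zeros.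
import Mathlib
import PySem

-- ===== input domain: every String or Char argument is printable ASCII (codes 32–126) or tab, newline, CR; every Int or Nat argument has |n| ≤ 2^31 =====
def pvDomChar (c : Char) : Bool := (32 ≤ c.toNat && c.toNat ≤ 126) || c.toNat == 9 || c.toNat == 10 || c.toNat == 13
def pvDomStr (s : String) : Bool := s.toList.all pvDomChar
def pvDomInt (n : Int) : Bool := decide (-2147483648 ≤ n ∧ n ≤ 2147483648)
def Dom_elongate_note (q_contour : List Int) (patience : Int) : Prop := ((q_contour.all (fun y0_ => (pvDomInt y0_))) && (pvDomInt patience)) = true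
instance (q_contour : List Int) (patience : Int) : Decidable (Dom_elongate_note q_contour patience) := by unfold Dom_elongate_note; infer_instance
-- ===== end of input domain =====

-- B rewrites A's element-by-element counter loop as a run-based scan that fills each
-- non-positive run in closed form (different decomposition, same cost).

-- ===== PORT A =====
-- literal transliteration of A's single loop with state (output, prev_pitch, non_pitch_count)
def elongate_note (q_contour : List Int) (patience : Int) : List Int :=
  (q_contour.foldl
    (fun (st : List Int × Int × Int) pitch =>
      let output := st.1
      let prev_pitch := st.2.1
      let non_pitch_count := st.2.2
      if pitch > 0 then
        (output ++ [pitch], pitch, 0)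
      else
        let non_pitch_count := non_pitch_count + 1
        if non_pitch_count > patience then
          -- prev_pitch := 0; non_pitch_count := 0; output.append(prev_pitch)
          (output ++ [(0 : Int)], (0 : Int), (0 : Int))
        else
          (output ++ [prev_pitch], prev_pitch, non_pitch_count))
    ([], 0, 0)).1

-- ===== PORT B =====
-- Source B's outer while-loop over maximal runs; the inner scanning whiles are the
-- takeWhile/dropWhile pair, the extend([prev]*k) / extend([0]*(L-k)) are replicates.
def elongate_note_altAux (patience : Int) (l : List Int) (prev : Int) : List Int :=
  match l with
  | [] => []
  | x :: xs =>
    if x > 0 then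
      let run := x :: xs.takeWhile (fun p => decide (0 < p))
      let rest := xs.dropWhile (fun p => decide (0 < p))
      run ++ elongate_note_altAux patience rest (run.getLastD 0)
    else
      let run := x :: xs.takeWhile (fun p => decide (p ≤ 0))
      let rest := xs.dropWhile (fun p => decide (p ≤ 0))
      let L : Int := run.length
      let k : Int := min L (max patience 0)
      List.replicate k.toNat prev ++ List.replicate (L - k).toNat 0 ++
        elongate_note_altAux patience rest (if k < L then 0 else prev)
termination_by l.length
decreasing_by
  · exact Nat.lt_succ_of_le (List.length_dropWhile_le _ _)
  · exact Nat.lt_succ_of_le (List.length_dropWhile_le _ _)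

def elongate_note_alt (q_contour : List Int) (patience : Int) : List Int :=
  elongate_note_altAux patience q_contour 0

-- ===== PRECONDITION & SPEC =====
def Spec_elongate_note (q_contour : List Int) (patience : Int) (out : List Int) : Prop := out = elongate_note_alt q_contour patience
instance (q_contour : List Int) (patience : Int) (out : List Int) : Decidable (Spec_elongate_note q_contour patience out) := by unfold Spec_elongate_note; infer_instance

-- ===== CLAIM (what is proved, stated in full; the proofs are below) =====
def Claim_equal_elongate_note : Prop := ∀ (q_contour : List Int) (patience : Int), Dom_elongate_note q_contour patience → Spec_elongate_note q_contour patience (elongate_note q_contour patience)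

-- ===== LEMMAS AND PROOFS =====

-- A's loop step, named so the induction can rewrite it
def stepA (patience : Int) (st : List Int × Int × Int) (pitch : Int) : List Int × Int × Int :=
  if 0 < pitch then (st.1 ++ [pitch], pitch, 0)
  else if patience < st.2.2 + 1 then (st.1 ++ [(0 : Int)], (0 : Int), (0 : Int))
  else (st.1 ++ [st.2.1], st.2.1, st.2.2 + 1)

-- A's loop, with the already-produced prefix factored out.
def goA (patience : Int) : List Int → Int → Int → List Int
  | [], _, _ => []
  | x :: xs, prev, cnt =>
    if 0 < x then x :: goA patience xs x 0
    else if patience < cnt + 1 then 0 :: goA patience xs 0 0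
    else prev :: goA patience xs prev (cnt + 1)

theorem elongate_note_eq_stepA (q_contour : List Int) (patience : Int) :
    elongate_note q_contour patience =
      (q_contour.foldl (stepA patience) ([], 0, 0)).1 := rfl

theorem foldl_stepA_eq_goA (patience : Int) (l : List Int) :
    ∀ (out : List Int) (prev cnt : Int),
    (l.foldl (stepA patience) (out, prev, cnt)).1 = out ++ goA patience l prev cnt := by
  induction l with
  | nil => intro out prev cnt; simp [goA]
  | cons x xs ih =>
    intro out prev cnt
    simp only [List.foldl_cons, stepA, goA]
    split_ifs with h1 h2 <;> rw [ih] <;> simp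

-- once prev = 0, a non-positive run only produces zeros
theorem goA_zero_run_zero (patience : Int) :
    ∀ (zs rest : List Int) (cnt : Int), (∀ z ∈ zs, z ≤ 0) →
    ∃ c', goA patience (zs ++ rest) 0 cnt =
      List.replicate zs.length 0 ++ goA patience rest 0 c' := by
  intro zs
  induction zs with
  | nil => intro rest cnt _; exact ⟨cnt, by simp⟩
  | cons z zs ih =>
    intro rest cnt hz
    have hzle : z ≤ 0 := hz z List.mem_cons_self
    have hz' : ∀ a ∈ zs, a ≤ 0 := fun a ha => hz a (List.mem_cons_of_mem _ ha)
    by_cases hc : patience < cnt + 1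
    · obtain ⟨c', hc'⟩ := ih rest 0 hz'
      refine ⟨c', ?_⟩
      simp only [List.cons_append, goA, if_neg (by omega : ¬ (0:Int) < z), if_pos hc, hc']
      simp [List.replicate_succ]
    · obtain ⟨c', hc'⟩ := ih rest (cnt + 1) hz'
      refine ⟨c', ?_⟩
      simp only [List.cons_append, goA, if_neg (by omega : ¬ (0:Int) < z), if_neg hc, hc']
      simp [List.replicate_succ]

-- a non-positive run, from count cnt: first min(L, (patience-cnt)⁺) entries copy prev, rest are 0
theorem goA_zero_run (patience : Int) :
    ∀ (zs rest : List Int) (prev cnt : Int), (∀ z ∈ zs, z ≤ 0) →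
    ∃ c', goA patience (zs ++ rest) prev cnt =
      List.replicate (min zs.length (patience - cnt).toNat) prev ++
      List.replicate (zs.length - min zs.length (patience - cnt).toNat) 0 ++
      goA patience rest
        (if min zs.length (patience - cnt).toNat < zs.length then 0 else prev) c' := by
  intro zs
  induction zs with
  | nil => intro rest prev cnt _; exact ⟨cnt, by simp⟩
  | cons z zs ih =>
    intro rest prev cnt hz
    have hzle : z ≤ 0 := hz z List.mem_cons_self
    have hz' : ∀ a ∈ zs, a ≤ 0 := fun a ha => hz a (List.mem_cons_of_mem _ ha)
    by_cases hc : patience < cnt + 1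
    · -- counter exceeded immediately: (patience - cnt).toNat = 0
      have hm : (patience - cnt).toNat = 0 := by omega
      obtain ⟨c', hc'⟩ := goA_zero_run_zero patience zs rest 0 hz'
      refine ⟨c', ?_⟩
      have hmin : min (z :: zs).length (patience - cnt).toNat = 0 := by simp [hm]
      simp only [List.cons_append, goA, if_neg (by omega : ¬ (0:Int) < z), if_pos hc, hc', hmin]
      simp [List.replicate_succ]
    · have hm1 : 1 ≤ (patience - cnt).toNat := by omega
      obtain ⟨c', hc'⟩ := ih rest prev (cnt + 1) hz'
      refine ⟨c', ?_⟩
      simp only [List.cons_append, goA, if_neg (by omega : ¬ (0:Int) < z), if_neg hc, hc']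
      have e1 : min (z :: zs).length (patience - cnt).toNat =
          min zs.length (patience - (cnt + 1)).toNat + 1 := by
        simp only [List.length_cons]; omega
      have e2 : (z :: zs).length - (min zs.length (patience - (cnt + 1)).toNat + 1) =
          zs.length - min zs.length (patience - (cnt + 1)).toNat := by
        simp only [List.length_cons]; omega
      have e3 : (min zs.length (patience - (cnt + 1)).toNat + 1 < (z :: zs).length) ↔
          (min zs.length (patience - (cnt + 1)).toNat < zs.length) := by
        simp only [List.length_cons]; omega
      rw [e1, e2, List.replicate_succ]
      simp only [e3]
      simp

-- a nonempty positive run is copied verbatim; prev becomes its last element, cnt resets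
theorem goA_pos_run (patience : Int) :
    ∀ (ps rest : List Int) (prev cnt : Int), (∀ p ∈ ps, 0 < p) → ps ≠ [] →
    goA patience (ps ++ rest) prev cnt = ps ++ goA patience rest (ps.getLastD 0) 0 := by
  intro ps
  induction ps with
  | nil => intro _ _ _ _ h; exact absurd rfl h
  | cons p ps ih =>
    intro rest prev cnt hp _
    have hpp : 0 < p := hp p List.mem_cons_self
    have hp' : ∀ a ∈ ps, 0 < a := fun a ha => hp a (List.mem_cons_of_mem _ ha)
    simp only [List.cons_append, goA, if_pos hpp]
    cases ps with
    | nil => simp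
    | cons q qs =>
      rw [ih rest p 0 hp' (by simp)]
      simp

-- the counter is irrelevant when the remaining list is empty or starts positive
theorem goA_cnt_irrel (patience : Int) (rest : List Int) (prev c c' : Int)
    (h : rest = [] ∨ ∃ y ys, rest = y :: ys ∧ 0 < y) :
    goA patience rest prev c = goA patience rest prev c' := by
  rcases h with h | ⟨y, ys, rfl, hy⟩
  · subst h; rfl
  · simp [goA, if_pos hy]

theorem dropWhile_cases {α : Type} (p : α → Bool) (l : List α) :
    l.dropWhile p = [] ∨ ∃ y ys, l.dropWhile p = y :: ys ∧ p y = false := by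
  induction l with
  | nil => exact Or.inl rfl
  | cons x xs ih =>
    by_cases hx : p x
    · simpa [hx] using ih
    · exact Or.inr ⟨x, xs, by simp [hx], by simp [hx]⟩

theorem goA_eq_alt (patience : Int) :
    ∀ (n : Nat) (l : List Int), l.length ≤ n → ∀ (prev : Int),
    goA patience l prev 0 = elongate_note_altAux patience l prev := by
  intro n
  induction n with
  | zero =>
    intro l hl prev
    have : l = [] := List.eq_nil_of_length_eq_zero (Nat.le_zero.mp hl)
    subst this; simp [goA, elongate_note_altAux]
  | succ n ih =>
    intro l hl prev
    cases l with
    | nil => simp [goA, elongate_note_altAux]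
    | cons x xs =>
      by_cases hx : 0 < x
      · -- positive run
        set run := x :: xs.takeWhile (fun p => decide (0 < p)) with hrun
        set rest := xs.dropWhile (fun p => decide (0 < p)) with hrest
        have hdec : x :: xs = run ++ rest := by
          simp [hrun, hrest, List.takeWhile_append_dropWhile]
        have hall : ∀ p ∈ run, 0 < p := by
          intro p hp
          have hp' : p = x ∨ p ∈ xs.takeWhile (fun p => decide (0 < p)) := by
            simpa [hrun] using hp
          rcases hp' with rfl | hp'
          · exact hx
          · simpa using List.mem_takeWhile_imp hp'
        have hlen : rest.length ≤ n := by
          have h1 : rest.length ≤ xs.length := by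
            rw [hrest]; exact List.length_dropWhile_le _ _
          simp only [List.length_cons] at hl
          omega
        conv_rhs => rw [elongate_note_altAux.eq_def]
        simp only [if_pos hx, ← hrun, ← hrest]
        rw [hdec, goA_pos_run patience run rest prev 0 hall (by simp [hrun]),
            ih rest hlen (run.getLastD 0)]
      · -- non-positive run
        set run := x :: xs.takeWhile (fun p => decide (p ≤ 0)) with hrun
        set rest := xs.dropWhile (fun p => decide (p ≤ 0)) with hrest
        have hdec : x :: xs = run ++ rest := by
          simp [hrun, hrest, List.takeWhile_append_dropWhile]
        have hall : ∀ z ∈ run, z ≤ 0 := by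
          intro z hz
          have hz' : z = x ∨ z ∈ xs.takeWhile (fun p => decide (p ≤ 0)) := by
            simpa [hrun] using hz
          rcases hz' with rfl | hz'
          · omega
          · simpa using List.mem_takeWhile_imp hz'
        have hlen : rest.length ≤ n := by
          have h1 : rest.length ≤ xs.length := by
            rw [hrest]; exact List.length_dropWhile_le _ _
          simp only [List.length_cons] at hl
          omega
        obtain ⟨c', hc'⟩ := goA_zero_run patience run rest prev 0 hall
        simp only [Int.sub_zero] at hc'
        have hrc : rest = [] ∨ ∃ y ys, rest = y :: ys ∧ 0 < y := by
          rcases dropWhile_cases (fun p => decide (p ≤ 0)) xs with h | ⟨y, ys, hy, hpy⟩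
          · exact Or.inl (by rw [hrest]; exact h)
          · refine Or.inr ⟨y, ys, by rw [hrest]; exact hy, ?_⟩
            have := hpy; simp at this; omega
        conv_rhs => rw [elongate_note_altAux.eq_def]
        simp only [if_neg hx, ← hrun, ← hrest]
        rw [hdec, hc', goA_cnt_irrel patience rest _ c' 0 hrc, ih rest hlen _]
        -- reconcile the Int-valued k of B with the Nat-valued min of the lemma
        have e1 : (min (run.length : Int) (max patience 0)).toNat =
            min run.length patience.toNat := by omega
        have e2 : ((run.length : Int) - min (run.length : Int) (max patience 0)).toNat =
            run.length - min run.length patience.toNat := by omega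
        have e3 : (min (run.length : Int) (max patience 0) < (run.length : Int)) ↔
            (min run.length patience.toNat < run.length) := by omega
        simp only [e1, e2, e3]

-- ===== VERDICT (by name: the statement is the Claim_ definition above) =====
theorem elongate_note_spec : Claim_equal_elongate_note := by
  intro q_contour patience _
  unfold Spec_elongate_note elongate_note_alt
  rw [elongate_note_eq_stepA, foldl_stepA_eq_goA patience q_contour [] 0 0]
  simpa using goA_eq_alt patience q_contour.length q_contour le_rfl 0
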